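-- pv_equiv track=rewrite | github.com/CCDRRR/Epi-Simulator | Simulator/Environment.py | create_districts
-- ===== SOURCE A (Python) =====
-- def create_districts(num_districts, width, height):
--     districts = {}
--     step = width // num_districts
--     district_id = 0
--     for i in range(num_districts):
--         for j in range(num_districts):
--             for x in range(i * step, (i + 1) * step):
--                 for y in range(j * step, (j + 1) * step):
--                     districts[(x, y)] = district_id
--             district_id += 1
--     return districts
-- ===== SOURCE B (Python) =====
-- def create_districts(num_districts, width, height):
--     step = width // num_districts
--     if num_districts <= 0:
--         return {}
--     side = num_districts * step
--     buckets = [[] for _ in range(num_districts * num_districts)]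
--     for x in range(side):
--         for y in range(side):
--             buckets[(x // step) * num_districts + y // step].append((x, y))
--     districts = {}
--     for d in range(num_districts * num_districts):
--         for cell in buckets[d]:
--             districts[cell] = d
--     return districts
-- ===== Notes on version B (the rewrite author's own statement) =====
-- stated objective: alternative
-- what changed: Replaces A's four nested district-by-district loops with a running id counter by a group-by pass: one row-major sweep over the grid routes each cell into a per-district bucket computed by integer division, and the buckets are then concatenated (via enumerate) into the dict.
import Mathlib
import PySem

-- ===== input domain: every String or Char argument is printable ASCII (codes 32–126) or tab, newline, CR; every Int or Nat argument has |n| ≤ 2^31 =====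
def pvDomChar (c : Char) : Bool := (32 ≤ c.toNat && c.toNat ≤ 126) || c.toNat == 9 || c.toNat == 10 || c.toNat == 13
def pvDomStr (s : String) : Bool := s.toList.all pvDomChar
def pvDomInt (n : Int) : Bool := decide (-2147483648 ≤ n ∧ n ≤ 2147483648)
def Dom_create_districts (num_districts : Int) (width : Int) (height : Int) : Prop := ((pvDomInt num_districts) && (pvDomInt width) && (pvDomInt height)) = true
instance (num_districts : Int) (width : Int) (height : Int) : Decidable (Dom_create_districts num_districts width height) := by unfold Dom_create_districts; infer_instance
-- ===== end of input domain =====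

-- B replaces A's four nested district-by-district loops (with a running district-id counter)
-- by one row-major pass over the grid that groups each cell into a per-district bucket computed
-- by integer division, then concatenates the buckets: a group-by/bucketing algorithm instead of
-- nested block generation; same asymptotic cost; return value only (no argument is mutated).

-- ===== PORT A =====
def create_districts (num_districts : Int) (width : Int) (height : Int) : List (Int × Int × Int) :=
  let step := PySem.Int.floordiv width num_districts
  let st := (PySem.List.pyRange 0 num_districts 1).foldl
    (fun (st : PySem.Dict (Int × Int) Int × Int) i =>
      (PySem.List.pyRange 0 num_districts 1).foldl
        (fun (st : PySem.Dict (Int × Int) Int × Int) j =>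
          ((PySem.List.pyRange (i * step) ((i + 1) * step) 1).foldl
            (fun dd x =>
              (PySem.List.pyRange (j * step) ((j + 1) * step) 1).foldl
                (fun dd y => dd.insert (x, y) st.2) dd)
            st.1,
           st.2 + 1))
        st)
    (PySem.Dict.empty, 0)
  st.1.items.map (fun p => (p.1.1, p.1.2, p.2))

-- ===== PORT B =====
-- buckets[...] is a plain list index in Source B; the computed index is always in range
-- (0 ≤ (x//step)*num_districts + y//step < num_districts² for the generated cells), so
-- List.modify at that index is exact here.
def create_districts_alt (num_districts : Int) (width : Int) (height : Int) : List (Int × Int × Int) :=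
  let step := PySem.Int.floordiv width num_districts
  if num_districts ≤ 0 then [] else
    let side := num_districts * step
    let buckets0 : List (List (Int × Int)) :=
      (PySem.List.pyRange 0 (num_districts * num_districts) 1).map (fun _ => [])
    let buckets := (PySem.List.pyRange 0 side 1).foldl
      (fun bs x => (PySem.List.pyRange 0 side 1).foldl
        (fun bs y =>
          bs.modify (PySem.Int.floordiv x step * num_districts + PySem.Int.floordiv y step).toNat
            (fun b => b ++ [(x, y)])) bs)
      buckets0
    let dd := (PySem.List.pyRange 0 (num_districts * num_districts) 1).foldl
      (fun (dd : PySem.Dict (Int × Int) Int) d =>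
        (PySem.List.pyGetD buckets d []).foldl (fun dd c => dd.insert c d) dd)
      PySem.Dict.empty
    dd.items.map (fun p => (p.1.1, p.1.2, p.2))

-- ===== PRECONDITION & SPEC =====
-- Pre_ excludes exactly num_districts = 0, where Python's 'width // num_districts' raises ZeroDivisionError.
def Pre_create_districts (num_districts : Int) (width : Int) (height : Int) : Prop := num_districts ≠ 0
instance (num_districts : Int) (width : Int) (height : Int) : Decidable (Pre_create_districts num_districts width height) := by unfold Pre_create_districts; infer_instance
def pvWitness_create_districts : Int × Int × Int := (2, 4, 3)

def Spec_create_districts (num_districts : Int) (width : Int) (height : Int) (out : List (Int × Int × Int)) : Prop := out = create_districts_alt num_districts width height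
instance (num_districts : Int) (width : Int) (height : Int) (out : List (Int × Int × Int)) : Decidable (Spec_create_districts num_districts width height out) := by unfold Spec_create_districts; infer_instance

-- ===== CLAIM (what is proved, stated in full; the proofs are below) =====
def Claim_equal_create_districts : Prop := ∀ (num_districts : Int) (width : Int) (height : Int), Dom_create_districts num_districts width height → Pre_create_districts num_districts width height → Spec_create_districts num_districts width height (create_districts num_districts width height)

-- ===== LEMMAS AND PROOFS =====

-- a single dict-insert step over an operation (key, value)
def insOp (dd : PySem.Dict (Int × Int) Int) (p : (Int × Int) × Int) : PySem.Dict (Int × Int) Int :=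
  dd.insert p.1 p.2

-- the (key, value) pairs A's two inner loops insert for block (i, j) with district id `id`
def cellOps (step i j id : Int) : List ((Int × Int) × Int) :=
  (PySem.List.pyRange (i * step) ((i + 1) * step) 1).flatMap (fun x =>
    (PySem.List.pyRange (j * step) ((j + 1) * step) 1).map (fun y => ((x, y), id)))

-- the full insertion sequence of A
def opsA (n step : Int) : List ((Int × Int) × Int) :=
  (PySem.List.pyRange 0 n 1).flatMap (fun i =>
    (PySem.List.pyRange 0 n 1).flatMap (fun j => cellOps step i j (i * n + j)))

-- the grid cells in B's row-major traversal order
def rowMajor (side : Int) : List (Int × Int) :=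
  (PySem.List.pyRange 0 side 1).flatMap (fun x =>
    (PySem.List.pyRange 0 side 1).map (fun y => (x, y)))

-- the bucket index B computes for a cell
def idOfN (step n : Int) (c : Int × Int) : Nat :=
  (PySem.Int.floordiv c.1 step * n + PySem.Int.floordiv c.2 step).toNat

-- the final content of bucket d
def bucketContent (step n d : Int) : List (Int × Int) :=
  (rowMajor (n * step)).filter (fun c => idOfN step n c == d.toNat)

-- B's insertion sequence
def opsB (n step : Int) : List ((Int × Int) × Int) :=
  (PySem.List.pyRange 0 (n * n) 1).flatMap (fun d =>
    (bucketContent step n d).map (fun c => (c, d)))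

-- a fold carrying (state, counter += k) splits into a pure fold (counter value known per element) and the final counter
theorem foldl_pair_counter {S : Type} (k : Int) (f : Int → Int → S → S) :
    ∀ (m : Nat) (a c : Int) (d : S),
      (PySem.List.pyRange a (a + (m : Int)) 1).foldl (fun st x => (f st.2 x st.1, st.2 + k)) (d, c)
      = ((PySem.List.pyRange a (a + (m : Int)) 1).foldl (fun dd x => f (c + k * (x - a)) x dd) d, c + k * m) := by
  intro m
  induction m with
  | zero => intro a c d; simp
  | succ m ih =>
    intro a c d
    have hcons : PySem.List.pyRange a (a + ((m + 1 : Nat) : Int)) 1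
        = a :: PySem.List.pyRange (a + 1) (a + ((m + 1 : Nat) : Int)) 1 :=
      PySem.List.pyRange_one_cons (by push_cast; omega)
    have hshift : a + ((m + 1 : Nat) : Int) = (a + 1) + (m : Int) := by push_cast; ring
    rw [hcons, List.foldl_cons, List.foldl_cons, hshift, ih (a + 1) (c + k) (f c a d)]
    have h1 : (fun (dd : S) x => f (c + k + k * (x - (a + 1))) x dd) = (fun dd x => f (c + k * (x - a)) x dd) := by
      funext dd x
      have : c + k + k * (x - (a + 1)) = c + k * (x - a) := by ring
      rw [this]
    have h2 : c + k * (a - a) = c := by ring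
    rw [h1, h2]
    have h3 : c + k + k * (m : Int) = c + k * ((m + 1 : Nat) : Int) := by push_cast; ring
    rw [h3]

theorem pyRange_shift (s b : Int) :
    PySem.List.pyRange s (s + b) 1 = (PySem.List.pyRange 0 b 1).map (fun k => s + k) := by
  simp [PySem.List.pyRange_one, List.map_map]

theorem rangeSplit (q : Int) (hq : 0 ≤ q) :
    ∀ (m : Nat), PySem.List.pyRange 0 ((m : Int) * q) 1
      = (PySem.List.pyRange 0 (m : Int) 1).flatMap (fun i =>
          (PySem.List.pyRange 0 q 1).map (fun j => i * q + j)) := by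
  intro m
  induction m with
  | zero => simp [PySem.List.pyRange_one_eq_nil]
  | succ m ih =>
    have h1 : PySem.List.pyRange 0 (((m + 1 : Nat) : Int) * q) 1
        = PySem.List.pyRange 0 ((m : Int) * q) 1 ++ PySem.List.pyRange ((m : Int) * q) (((m + 1 : Nat) : Int) * q) 1 := by
      apply PySem.List.pyRange_one_append
      · positivity
      · push_cast; nlinarith
    have h2 : PySem.List.pyRange 0 ((m + 1 : Nat) : Int) 1
        = PySem.List.pyRange 0 (m : Int) 1 ++ [(m : Int)] := by
      have hc : ((m + 1 : Nat) : Int) = (m : Int) + 1 := by push_cast; ring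
      rw [hc]
      apply PySem.List.pyRange_one_succ_right
      positivity
    have h3 : (((m + 1 : Nat) : Int)) * q = (m : Int) * q + q := by push_cast; ring
    rw [h1, h2, List.flatMap_append, ih, h3, pyRange_shift ((m : Int) * q) q]
    simp

theorem fd_of_block (i j q : Int) (hq : 0 < q) (hj0 : 0 ≤ j) (hj : j < q) :
    PySem.Int.floordiv (i * q + j) q = i := by
  rw [PySem.Int.floordiv_eq_iff_of_pos hq]
  constructor <;> nlinarith

theorem cellOps_nil (step i j id : Int) (hs : step ≤ 0) : cellOps step i j id = [] := by
  unfold cellOps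
  have ho : PySem.List.pyRange (i * step) ((i + 1) * step) 1 = [] :=
    PySem.List.pyRange_one_eq_nil (by nlinarith)
  rw [ho]
  rfl

theorem opsA_nil_of_step_nonpos (n step : Int) (hs : step ≤ 0) : opsA n step = [] := by
  unfold opsA
  simp [cellOps_nil _ _ _ _ hs]

-- A's nested fold with its running district_id computes the fold of insOp over opsA
theorem dictA_eq (n step : Int) (hn : 0 ≤ n) :
    ((PySem.List.pyRange 0 n 1).foldl
      (fun (st : PySem.Dict (Int × Int) Int × Int) i =>
        (PySem.List.pyRange 0 n 1).foldl
          (fun (st : PySem.Dict (Int × Int) Int × Int) j =>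
            ((PySem.List.pyRange (i * step) ((i + 1) * step) 1).foldl
              (fun dd x =>
                (PySem.List.pyRange (j * step) ((j + 1) * step) 1).foldl
                  (fun dd y => dd.insert (x, y) st.2) dd)
              st.1,
             st.2 + 1))
          st)
      (PySem.Dict.empty, 0)).1
    = (opsA n step).foldl insOp PySem.Dict.empty := by
  obtain ⟨m, hm⟩ : ∃ m : Nat, n = (m : Int) := ⟨n.toNat, (Int.toNat_of_nonneg hn).symm⟩
  subst hm
  have hinner : ∀ (st : PySem.Dict (Int × Int) Int × Int) (i : Int),
      (PySem.List.pyRange 0 (m : Int) 1).foldl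
        (fun (st : PySem.Dict (Int × Int) Int × Int) j =>
          ((PySem.List.pyRange (i * step) ((i + 1) * step) 1).foldl
            (fun dd x =>
              (PySem.List.pyRange (j * step) ((j + 1) * step) 1).foldl
                (fun dd y => dd.insert (x, y) st.2) dd)
            st.1,
           st.2 + 1))
        st
      = ((PySem.List.pyRange 0 (m : Int) 1).foldl
          (fun dd j => (cellOps step i j (st.2 + j)).foldl insOp dd) st.1,
         st.2 + m) := by
    intro st i
    have h := foldl_pair_counter 1
      (fun id j dd => (cellOps step i j id).foldl insOp dd) m 0 st.2 st.1
    simp only [zero_add, one_mul, sub_zero] at h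
    have hcell : ∀ (id j : Int) (dd : PySem.Dict (Int × Int) Int),
        (cellOps step i j id).foldl insOp dd
        = (PySem.List.pyRange (i * step) ((i + 1) * step) 1).foldl
            (fun dd x =>
              (PySem.List.pyRange (j * step) ((j + 1) * step) 1).foldl
                (fun dd y => dd.insert (x, y) id) dd) dd := by
      intro id j dd
      unfold cellOps
      rw [List.foldl_flatMap]
      refine PySem.List.foldl_congr_mem _ _ _ _ (fun acc x hx => ?_)
      rw [List.foldl_map]
      rfl
    calc (PySem.List.pyRange 0 (m : Int) 1).foldl
          (fun (st : PySem.Dict (Int × Int) Int × Int) j =>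
            ((PySem.List.pyRange (i * step) ((i + 1) * step) 1).foldl
              (fun dd x =>
                (PySem.List.pyRange (j * step) ((j + 1) * step) 1).foldl
                  (fun dd y => dd.insert (x, y) st.2) dd)
              st.1,
             st.2 + 1))
          st
        = (PySem.List.pyRange 0 (m : Int) 1).foldl
            (fun (st : PySem.Dict (Int × Int) Int × Int) j =>
              ((cellOps step i j st.2).foldl insOp st.1, st.2 + 1)) st := by
          refine PySem.List.foldl_congr_mem _ _ _ _ (fun acc j hj => ?_)
          rw [hcell]
      _ = _ := by
          rcases st with ⟨d, c⟩
          exact h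
  calc ((PySem.List.pyRange 0 (m : Int) 1).foldl
        (fun (st : PySem.Dict (Int × Int) Int × Int) i =>
          (PySem.List.pyRange 0 (m : Int) 1).foldl
            (fun (st : PySem.Dict (Int × Int) Int × Int) j =>
              ((PySem.List.pyRange (i * step) ((i + 1) * step) 1).foldl
                (fun dd x =>
                  (PySem.List.pyRange (j * step) ((j + 1) * step) 1).foldl
                    (fun dd y => dd.insert (x, y) st.2) dd)
                st.1,
               st.2 + 1))
            st)
        (PySem.Dict.empty, 0)).1
      = ((PySem.List.pyRange 0 (m : Int) 1).foldl
          (fun (st : PySem.Dict (Int × Int) Int × Int) i =>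
            ((PySem.List.pyRange 0 (m : Int) 1).foldl
              (fun dd j => (cellOps step i j (st.2 + j)).foldl insOp dd) st.1,
             st.2 + m))
          (PySem.Dict.empty, 0)).1 := by
        congr 1
        refine PySem.List.foldl_congr_mem _ _ _ _ (fun acc i hi => ?_)
        exact hinner acc i
    _ = (opsA (m : Int) step).foldl insOp PySem.Dict.empty := by
        have h := foldl_pair_counter (m : Int)
          (fun id i dd => (PySem.List.pyRange 0 (m : Int) 1).foldl
            (fun dd j => (cellOps step i j (id + j)).foldl insOp dd) dd) m 0 0 PySem.Dict.empty
        simp only [zero_add, sub_zero] at h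
        rw [h]
        unfold opsA
        rw [List.foldl_flatMap]
        refine PySem.List.foldl_congr_mem _ _ _ _ (fun acc i hi => ?_)
        rw [List.foldl_flatMap]
        refine PySem.List.foldl_congr_mem _ _ _ _ (fun acc2 j hj => ?_)
        have : (m : Int) * i + j = i * (m : Int) + j := by ring
        rw [this]

-- B-SIDE LEMMAS

-- a bucketing fold, read pointwise: bucket k collects exactly the elements routed to k, in order
theorem foldl_modify_getElem? {α : Type} (f : α → Nat) :
    ∀ (cs : List α) (bs : List (List α)) (k : Nat),
      (cs.foldl (fun bs c => bs.modify (f c) (fun b => b ++ [c])) bs)[k]?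
        = bs[k]?.map (fun b => b ++ cs.filter (fun c => f c == k)) := by
  intro cs
  induction cs with
  | nil => intro bs k; simp
  | cons c cs ih =>
    intro bs k
    rw [List.foldl_cons, ih, List.getElem?_modify]
    by_cases h : f c = k
    · cases hk : bs[k]? <;> simp [h]
    · cases hk : bs[k]? <;> simp [h]

theorem getElem?_pyRange (m : Int) (k : Nat) :
    (PySem.List.pyRange 0 m 1)[k]? = if k < m.toNat then some (k : Int) else none := by
  simp [PySem.List.pyRange_one, List.getElem?_map]
  split_ifs <;> simp_all

theorem nodup_pyRange (m : Int) : (PySem.List.pyRange 0 m 1).Nodup := by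
  rw [PySem.List.pyRange_one]
  refine List.Nodup.map ?_ (List.nodup_range)
  intro a b hab
  simpa using hab

-- the nested x/y loop of B is the bucketing fold over the row-major cell list
theorem buckets_nested (n step side : Int) (bs : List (List (Int × Int))) :
    (PySem.List.pyRange 0 side 1).foldl
      (fun bs x => (PySem.List.pyRange 0 side 1).foldl
        (fun bs y =>
          bs.modify (PySem.Int.floordiv x step * n + PySem.Int.floordiv y step).toNat
            (fun b => b ++ [(x, y)])) bs) bs
    = (rowMajor side).foldl (fun bs c => bs.modify (idOfN step n c) (fun b => b ++ [c])) bs := by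
  unfold rowMajor
  rw [List.foldl_flatMap]
  refine PySem.List.foldl_congr_mem _ _ _ _ (fun acc x hx => ?_)
  rw [List.foldl_map]
  rfl

-- the buckets after the pass: bucket d holds exactly the cells of district d, row-major
theorem buckets_eq (n step : Int) :
    (rowMajor (n * step)).foldl (fun bs c => bs.modify (idOfN step n c) (fun b => b ++ [c]))
        ((PySem.List.pyRange 0 (n * n) 1).map (fun _ => []))
    = (PySem.List.pyRange 0 (n * n) 1).map (fun d => bucketContent step n d) := by
  apply List.ext_getElem?
  intro k
  rw [foldl_modify_getElem?, List.getElem?_map, List.getElem?_map, getElem?_pyRange]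
  split_ifs with h
  · simp [bucketContent]
  · rfl

theorem flatMap_ite_single {α : Type} :
    ∀ (l : List Int) (j : Int) (L : List α), l.Nodup → j ∈ l →
      l.flatMap (fun a => if a = j then L else []) = L := by
  intro l
  induction l with
  | nil => intro j L _ hj; cases hj
  | cons a t ih =>
    intro j L hnd hj
    rw [List.flatMap_cons]
    rcases List.mem_cons.mp hj with h | h
    · subst h
      rw [if_pos rfl]
      have hnotin : j ∉ t := (List.nodup_cons.mp hnd).1
      have : t.flatMap (fun a => if a = j then L else []) = [] := by
        apply List.flatMap_eq_nil_iff.mpr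
        intro a ha
        rw [if_neg (by rintro rfl; exact hnotin ha)]
      rw [this, List.append_nil]
    · have hne : a ≠ j := by rintro rfl; exact (List.nodup_cons.mp hnd).1 h
      rw [if_neg hne, List.nil_append]
      exact ih j L (List.nodup_cons.mp hnd).2 h

-- uniqueness of the (block, offset) decomposition of a district id
theorem digit_unique (n a b i j : Int) (hn : 0 < n) (hb0 : 0 ≤ b) (hb : b < n)
    (hj0 : 0 ≤ j) (hj : j < n) : a * n + b = i * n + j ↔ a = i ∧ b = j := by
  constructor
  · intro h
    have ha : a = i := by nlinarith [sq_nonneg (a - i)]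
    exact ⟨ha, by nlinarith⟩
  · rintro ⟨rfl, rfl⟩; rfl

-- the cells of range(0, n*step) whose block quotient is j form exactly block j's range
theorem filter_block (n step j : Int) (hn : 0 < n) (hs : 0 < step) (hj0 : 0 ≤ j) (hj : j < n) :
    (PySem.List.pyRange 0 (n * step) 1).filter (fun y => decide (PySem.Int.floordiv y step = j))
      = PySem.List.pyRange (j * step) ((j + 1) * step) 1 := by
  obtain ⟨m, hm⟩ : ∃ m : Nat, n = (m : Int) := ⟨n.toNat, (Int.toNat_of_nonneg (le_of_lt hn)).symm⟩
  rw [hm, rangeSplit step (le_of_lt hs) m, List.filter_flatMap]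
  have hstep : PySem.List.pyRange (j * step) ((j + 1) * step) 1
      = (PySem.List.pyRange 0 step 1).map (fun dy => j * step + dy) := by
    have : (j + 1) * step = j * step + step := by ring
    rw [this, pyRange_shift]
  have hbody : ∀ j' ∈ PySem.List.pyRange 0 (m : Int) 1,
      ((PySem.List.pyRange 0 step 1).map (fun dy => j' * step + dy)).filter
          (fun y => decide (PySem.Int.floordiv y step = j))
        = if j' = j then PySem.List.pyRange (j * step) ((j + 1) * step) 1 else [] := by
    intro j' hj'
    rw [List.filter_map]
    simp only [Function.comp_def]
    have hcong : ∀ dy ∈ PySem.List.pyRange 0 step 1,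
        (decide (PySem.Int.floordiv (j' * step + dy) step = j)) = decide (j' = j) := by
      intro dy hdy
      have hdy' := (PySem.List.mem_pyRange_one).1 hdy
      simp [fd_of_block j' dy step hs hdy'.1 hdy'.2]
    rw [List.filter_congr hcong]
    by_cases h : j' = j
    · subst h
      simp [hstep]
    · simp [h]
  calc (PySem.List.pyRange 0 (m : Int) 1).flatMap
        (fun j' => ((PySem.List.pyRange 0 step 1).map (fun dy => j' * step + dy)).filter
          (fun y => decide (PySem.Int.floordiv y step = j)))
      = (PySem.List.pyRange 0 (m : Int) 1).flatMap
          (fun j' => if j' = j then PySem.List.pyRange (j * step) ((j + 1) * step) 1 else []) := by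
        exact List.flatMap_congr hbody
    _ = _ := by
        apply flatMap_ite_single _ _ _ (nodup_pyRange _)
        rw [PySem.List.mem_pyRange_one]
        omega

-- bucket (i*n+j) holds exactly block (i, j)'s cells, in A's inner traversal order
theorem bucketContent_block (n step i j : Int) (hn : 0 < n) (hs : 0 < step)
    (hi0 : 0 ≤ i) (hi : i < n) (hj0 : 0 ≤ j) (hj : j < n) :
    bucketContent step n (i * n + j)
      = (PySem.List.pyRange (i * step) ((i + 1) * step) 1).flatMap (fun x =>
          (PySem.List.pyRange (j * step) ((j + 1) * step) 1).map (fun y => (x, y))) := by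
  unfold bucketContent rowMajor
  rw [List.filter_flatMap]
  have hbody : ∀ x ∈ PySem.List.pyRange 0 (n * step) 1,
      ((PySem.List.pyRange 0 (n * step) 1).map (fun y => (x, y))).filter
          (fun c => idOfN step n c == (i * n + j).toNat)
        = if PySem.Int.floordiv x step = i
            then (PySem.List.pyRange (j * step) ((j + 1) * step) 1).map (fun y => (x, y))
            else [] := by
    intro x hx
    have hx' := (PySem.List.mem_pyRange_one).1 hx
    have hfx0 : 0 ≤ PySem.Int.floordiv x step := by
      rw [PySem.Int.floordiv_eq_ediv_of_pos hs]; exact Int.ediv_nonneg hx'.1 (le_of_lt hs)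
    rw [List.filter_map]
    simp only [Function.comp_def]
    have hcong : ∀ y ∈ PySem.List.pyRange 0 (n * step) 1,
        (idOfN step n (x, y) == (i * n + j).toNat)
          = ((decide (PySem.Int.floordiv x step = i)) && (decide (PySem.Int.floordiv y step = j))) := by
      intro y hy
      have hy' := (PySem.List.mem_pyRange_one).1 hy
      have hfy0 : 0 ≤ PySem.Int.floordiv y step := by
        rw [PySem.Int.floordiv_eq_ediv_of_pos hs]; exact Int.ediv_nonneg hy'.1 (le_of_lt hs)
      have hfyn : PySem.Int.floordiv y step < n := by
        rw [PySem.Int.floordiv_lt_iff_lt_mul hs]; linarith [hy'.2]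
      simp only [idOfN]
      have hval0 : 0 ≤ PySem.Int.floordiv x step * n + PySem.Int.floordiv y step := by positivity
      have hid0 : 0 ≤ i * n + j := by positivity
      have hiff0 : ((PySem.Int.floordiv x step * n + PySem.Int.floordiv y step).toNat
            = (i * n + j).toNat)
          ↔ (PySem.Int.floordiv x step * n + PySem.Int.floordiv y step = i * n + j) := by
        omega
      have hiff := hiff0.trans (digit_unique n _ _ i j hn hfy0 hfyn hj0 hj)
      rcases Bool.eq_false_or_eq_true ((decide (PySem.Int.floordiv x step = i)) && (decide (PySem.Int.floordiv y step = j))) with hb | hb <;>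
        rw [hb] <;> simp_all
    rw [List.filter_congr hcong]
    by_cases h : PySem.Int.floordiv x step = i
    · rw [if_pos h]
      simp only [h, decide_true, Bool.true_and]
      rw [filter_block n step j hn hs hj0 hj]
    · rw [if_neg h]
      simp [h]
  rw [List.flatMap_congr hbody]
  obtain ⟨m, hm⟩ : ∃ m : Nat, n = (m : Int) := ⟨n.toNat, (Int.toNat_of_nonneg (le_of_lt hn)).symm⟩
  have hsplit : PySem.List.pyRange 0 (n * step) 1
      = (PySem.List.pyRange 0 n 1).flatMap (fun i' =>
          (PySem.List.pyRange 0 step 1).map (fun dx => i' * step + dx)) := by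
    rw [hm]; exact rangeSplit step (le_of_lt hs) m
  rw [hsplit, List.flatMap_assoc]
  have hinner : ∀ i' ∈ PySem.List.pyRange 0 n 1,
      ((PySem.List.pyRange 0 step 1).map (fun dx => i' * step + dx)).flatMap
          (fun x => if PySem.Int.floordiv x step = i
            then (PySem.List.pyRange (j * step) ((j + 1) * step) 1).map (fun y => (x, y))
            else [])
        = if i' = i
            then (PySem.List.pyRange 0 step 1).flatMap (fun dx =>
              (PySem.List.pyRange (j * step) ((j + 1) * step) 1).map (fun y => (i * step + dx, y)))
            else [] := by
    intro i' hi'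
    rw [List.flatMap_map]
    by_cases h : i' = i
    · subst h
      rw [if_pos rfl]
      refine List.flatMap_congr (fun dx hdx => ?_)
      have hdx' := (PySem.List.mem_pyRange_one).1 hdx
      rw [if_pos (fd_of_block i' dx step hs hdx'.1 hdx'.2)]
    · rw [if_neg h]
      apply List.flatMap_eq_nil_iff.mpr
      intro dx hdx
      have hdx' := (PySem.List.mem_pyRange_one).1 hdx
      rw [if_neg (by rw [fd_of_block i' dx step hs hdx'.1 hdx'.2]; exact h)]
  rw [List.flatMap_congr hinner,
    flatMap_ite_single _ i _ (nodup_pyRange _) (by rw [PySem.List.mem_pyRange_one]; omega)]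
  have hblock : PySem.List.pyRange (i * step) ((i + 1) * step) 1
      = (PySem.List.pyRange 0 step 1).map (fun dx => i * step + dx) := by
    have : (i + 1) * step = i * step + step := by ring
    rw [this, pyRange_shift]
  rw [hblock, List.flatMap_map]

theorem opsB_eq_opsA (n step : Int) (hn : 0 < n) (hs : 0 < step) :
    opsB n step = opsA n step := by
  unfold opsB opsA
  obtain ⟨m, hm⟩ : ∃ m : Nat, n = (m : Int) := ⟨n.toNat, (Int.toNat_of_nonneg (le_of_lt hn)).symm⟩
  have hsplit : PySem.List.pyRange 0 (n * n) 1
      = (PySem.List.pyRange 0 n 1).flatMap (fun i =>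
          (PySem.List.pyRange 0 n 1).map (fun j => i * n + j)) := by
    rw [hm]; exact rangeSplit (m : Int) (by positivity) m
  rw [hsplit, List.flatMap_assoc]
  refine List.flatMap_congr (fun i hi => ?_)
  rw [List.flatMap_map]
  refine List.flatMap_congr (fun j hj => ?_)
  have hi' := (PySem.List.mem_pyRange_one).1 hi
  have hj' := (PySem.List.mem_pyRange_one).1 hj
  rw [bucketContent_block n step i j hn hs hi'.1 hi'.2 hj'.1 hj'.2]
  unfold cellOps
  rw [List.map_flatMap]
  refine List.flatMap_congr (fun x hx => ?_)
  rw [List.map_map]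
  rfl

-- B's bucket-concatenation pass is the fold of insOp over opsB
theorem dictB_eq (n step : Int) :
    ((PySem.List.pyRange 0 (n * n) 1).foldl
        (fun (dd : PySem.Dict (Int × Int) Int) d =>
          (PySem.List.pyGetD ((PySem.List.pyRange 0 (n * n) 1).map (fun d' => bucketContent step n d')) d []).foldl
            (fun dd c => dd.insert c d) dd) PySem.Dict.empty)
    = (opsB n step).foldl insOp PySem.Dict.empty := by
  unfold opsB
  rw [List.foldl_flatMap]
  refine PySem.List.foldl_congr_mem _ _ _ _ (fun acc d hd => ?_)
  have hd' := (PySem.List.mem_pyRange_one).1 hd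
  obtain ⟨M, hM⟩ : ∃ M : Nat, n * n = (M : Int) :=
    ⟨(n * n).toNat, (Int.toNat_of_nonneg (mul_self_nonneg n)).symm⟩
  obtain ⟨k, hk⟩ : ∃ k : Nat, d = (k : Int) :=
    ⟨d.toNat, (Int.toNat_of_nonneg hd'.1).symm⟩
  have hkM : k < M := by omega
  rw [hM, hk, PySem.List.pyGetD_map_pyRange _ _ _ _ hkM, List.foldl_map]
  rfl

theorem opsB_nil_of_step_nonpos (n step : Int) (hn : 0 < n) (hs : step ≤ 0) :
    opsB n step = [] := by
  unfold opsB bucketContent rowMajor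
  have hside : n * step ≤ 0 := mul_nonpos_of_nonneg_of_nonpos (le_of_lt hn) hs
  rw [PySem.List.pyRange_one_eq_nil hside]
  simp

-- ===== VERDICT (by name: the statement is the Claim_ definition above) =====
theorem create_districts_spec : Claim_equal_create_districts := by
  intro n w h _dom hpre
  unfold Pre_create_districts at hpre
  unfold Spec_create_districts
  by_cases hn : n ≤ 0
  · -- num_districts < 0: A's outer range is empty, B's guard fires
    simp [create_districts, create_districts_alt, PySem.List.pyRange_one_eq_nil hn, hn]
    rfl
  · have hn' : 0 < n := lt_of_not_ge hn
    simp only [create_districts, create_districts_alt]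
    rw [if_neg (not_le.mpr hn')]
    rw [dictA_eq n (PySem.Int.floordiv w n) (le_of_lt hn')]
    rw [buckets_nested, buckets_eq, dictB_eq]
    by_cases hs : PySem.Int.floordiv w n ≤ 0
    · rw [opsA_nil_of_step_nonpos n _ hs, opsB_nil_of_step_nonpos n _ hn' hs]
    · rw [opsB_eq_opsA n _ hn' (lt_of_not_ge hs)]
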